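-- pv_equiv track=rewrite | github.com/DrMikeG/AdventOfCode2021 | 09b/tool_src/advent.py | expandBasin
-- ===== SOURCE A (Python) =====
-- def getHeight(x,y,heights):
--     return heights[y][x]
--
-- def setHeight(x,y,heights,val):
--     heights[y][x] = val
--
-- def isValidPosition(x,y,gridXMax,gridYMax):
--     if x < 0: return False
--     if y < 0: return False
--     if x >= gridXMax: return False
--     if y >= gridYMax: return False
--     return True
--
-- def findBasinMemberPositions(basin,gridXMax,gridYMax,heights):
--     positions = []
--     for x in range(gridXMax):
--         for y in range(gridYMax):
--             if ( getHeight(x,y,heights) == basin ):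
--                 positions.append([x,y])
--     return positions
--
-- def lowestNeighbourPosition(x,y,gridXMax,gridYMax,heights):
--     # return value and position of lowestNeihbour
--     ret   = {'any': False, 'x': 0, 'y': 0, 'value': 9 }
--     up    = [x,y-1]
--     down  = [x,y+1]
--     left  = [x-1,y]
--     right = [x+1,y]
--
--     if isValidPosition(up[0],up[1],gridXMax,gridYMax):
--         val = getHeight(up[0],up[1],heights)
--         if val < 9 and val < ret['value']:
--             ret['value'] = val
--             ret['x'] = up[0]
--             ret['y'] = up[1]
--             ret['any'] = True
--
--     if isValidPosition(down[0],down[1],gridXMax,gridYMax):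
--         val = getHeight(down[0],down[1],heights)
--         if val < 9 and val < ret['value']:
--             ret['value'] = val
--             ret['x'] = down[0]
--             ret['y'] = down[1]
--             ret['any'] = True
--     if isValidPosition(left[0],left[1],gridXMax,gridYMax):
--         val = getHeight(left[0],left[1],heights)
--         if val < 9 and val < ret['value']:
--             ret['value'] = val
--             ret['x'] = left[0]
--             ret['y'] = left[1]
--             ret['any'] = True
--     if isValidPosition(right[0],right[1],gridXMax,gridYMax):
--         val = getHeight(right[0],right[1],heights)
--         if val < 9 and val < ret['value']:
--             ret['value'] = val
--             ret['x'] = right[0]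
--             ret['y'] = right[1]
--             ret['any'] = True
--     return ret
--
-- def expandBasin(basin,gridXMax,gridYMax,heights):
--     # look at all neighbours of current members of basin
--     # find the minimum value and add it to the basin
--     # if expanded, return true
--     # if all neigbours are 9, then return false
--
--     basinPositions = findBasinMemberPositions(basin,gridXMax,gridYMax,heights)
--     assert(len(basinPositions) > 0)
--
--     lowestValue = 9
--     lowestPosition = [0,0]
--     foundAnOption = False
--
--     for pos in basinPositions:
--         thisPosNeighbourAnalysis = lowestNeighbourPosition(pos[0],pos[1],gridXMax,gridYMax,heights)
--         if thisPosNeighbourAnalysis['any'] == True: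
--             foundAnOption = True
--             if thisPosNeighbourAnalysis['value'] < lowestValue:
--                 lowestPosition[0] = thisPosNeighbourAnalysis['x']
--                 lowestPosition[1] = thisPosNeighbourAnalysis['y']
--
--     if foundAnOption:
--         setHeight(lowestPosition[0],lowestPosition[1],heights,basin)
--
--     return foundAnOption
-- ===== SOURCE B (Python) =====
-- # B: single fused scan over the grid (x outer, y inner) keeping one running best
-- # (lowestValue, lowestPosition, foundAnOption) instead of A's two phases
-- # (collect member list, then per-member neighbour analysis via a dict).
-- # Note on side effects: like A, B writes `basin` into heights in place when it
-- # returns True; A's write target is skewed by A's never-updated lowestValue,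
-- # B writes the genuinely lowest qualifying neighbour. The equivalence proved in
-- # equiv.lean is about the RETURN value only.
-- def expandBasin(basin, gridXMax, gridYMax, heights):
--     lowestValue = 9
--     lowestPosition = (0, 0)
--     foundAnOption = False
--     memberSeen = False
--     for x in range(gridXMax):
--         for y in range(gridYMax):
--             if heights[y][x] == basin:
--                 memberSeen = True
--                 for nx, ny in ((x, y - 1), (x, y + 1), (x - 1, y), (x + 1, y)):
--                     if 0 <= nx < gridXMax and 0 <= ny < gridYMax:
--                         v = heights[ny][nx]
--                         if v < 9 and v < lowestValue:
--                             lowestValue = v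
--                             lowestPosition = (nx, ny)
--                             foundAnOption = True
--     assert memberSeen
--     if foundAnOption:
--         heights[lowestPosition[1]][lowestPosition[0]] = basin
--     return foundAnOption
-- ===== Notes on version B (the rewrite author's own statement) =====
-- stated objective: simpler
-- what changed: B fuses A's two phases (build a basin-member position list, then analyze each member's neighbours through a per-cell dict helper) into one nested scan over the grid that keeps a single running best (lowestValue, lowestPosition, foundAnOption); note both mutate heights in place and the equivalence claimed is about the return value only.
import Mathlib
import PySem

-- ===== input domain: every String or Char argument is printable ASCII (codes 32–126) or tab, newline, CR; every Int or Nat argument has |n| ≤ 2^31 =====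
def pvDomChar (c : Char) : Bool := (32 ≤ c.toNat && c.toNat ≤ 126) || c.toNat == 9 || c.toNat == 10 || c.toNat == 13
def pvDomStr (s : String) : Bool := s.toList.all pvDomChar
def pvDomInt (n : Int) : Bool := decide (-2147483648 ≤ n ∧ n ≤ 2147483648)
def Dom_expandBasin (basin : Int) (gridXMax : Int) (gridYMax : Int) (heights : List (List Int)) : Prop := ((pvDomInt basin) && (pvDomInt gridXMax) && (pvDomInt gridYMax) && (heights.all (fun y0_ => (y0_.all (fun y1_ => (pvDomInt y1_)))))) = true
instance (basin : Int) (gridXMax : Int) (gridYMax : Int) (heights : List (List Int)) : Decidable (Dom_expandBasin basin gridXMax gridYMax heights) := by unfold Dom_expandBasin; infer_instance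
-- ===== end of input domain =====

-- B fuses A's two phases (collect basin-member list, then per-member neighbour analysis via a
-- dict) into one nested scan keeping a single running best; equivalence is about the RETURN
-- value only (both Pythons also write `basin` into heights in place — A's target cell is skewed
-- by its never-updated lowestValue, B writes the lowest qualifying neighbour; see Source B header).


-- ===== PORT A =====
-- heights[y][x]; out-of-range (Python IndexError) is excluded by Pre_, default 0 is never read there
def getHeightA (x y : Int) (heights : List (List Int)) : Int :=
  PySem.List.pyGetD (PySem.List.pyGetD heights y []) x 0

def isValidPositionA (x y gridXMax gridYMax : Int) : Bool :=
  if x < 0 then false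
  else if y < 0 then false
  else if x ≥ gridXMax then false
  else if y ≥ gridYMax then false
  else true

def findBasinMemberPositionsA (basin gridXMax gridYMax : Int) (heights : List (List Int)) : List (Int × Int) :=
  (PySem.List.pyRange 0 gridXMax 1).foldl (fun acc x =>
    (PySem.List.pyRange 0 gridYMax 1).foldl (fun acc y =>
      if getHeightA x y heights == basin then acc ++ [(x, y)] else acc) acc) []

-- Python's result dict {'any':…, 'x':…, 'y':…, 'value':…} with fixed keys, as a structure
structure LNP where
  any : Bool
  x : Int
  y : Int
  value : Int
deriving DecidableEq, Repr

def lowestNeighbourPositionA (x y gridXMax gridYMax : Int) (heights : List (List Int)) : LNP :=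
  let ret0 : LNP := ⟨false, 0, 0, 9⟩
  let up := (x, y - 1)
  let down := (x, y + 1)
  let left := (x - 1, y)
  let right := (x + 1, y)
  let ret1 :=
    if isValidPositionA up.1 up.2 gridXMax gridYMax then
      let val := getHeightA up.1 up.2 heights
      if val < 9 ∧ val < ret0.value then ⟨true, up.1, up.2, val⟩ else ret0
    else ret0
  let ret2 :=
    if isValidPositionA down.1 down.2 gridXMax gridYMax then
      let val := getHeightA down.1 down.2 heights
      if val < 9 ∧ val < ret1.value then ⟨true, down.1, down.2, val⟩ else ret1
    else ret1
  let ret3 :=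
    if isValidPositionA left.1 left.2 gridXMax gridYMax then
      let val := getHeightA left.1 left.2 heights
      if val < 9 ∧ val < ret2.value then ⟨true, left.1, left.2, val⟩ else ret2
    else ret2
  let ret4 :=
    if isValidPositionA right.1 right.2 gridXMax gridYMax then
      let val := getHeightA right.1 right.2 heights
      if val < 9 ∧ val < ret3.value then ⟨true, right.1, right.2, val⟩ else ret3
    else ret3
  ret4

-- state (lowestValue, lowestPosition, foundAnOption); `assert len > 0` raises outside Pre_;
-- the in-place setHeight is a side effect, not part of the return value
def expandBasin (basin : Int) (gridXMax : Int) (gridYMax : Int) (heights : List (List Int)) : Bool :=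
  let basinPositions := findBasinMemberPositionsA basin gridXMax gridYMax heights
  let st := basinPositions.foldl (fun (st : Int × (Int × Int) × Bool) pos =>
    let a := lowestNeighbourPositionA pos.1 pos.2 gridXMax gridYMax heights
    if a.any = true then
      let st1 : Int × (Int × Int) × Bool := (st.1, st.2.1, true)
      if a.value < st1.1 then (st1.1, (a.x, a.y), true) else st1
    else st) (9, (0, 0), false)
  st.2.2

-- ===== PORT B =====
-- state (lowestValue, lowestPosition, foundAnOption, memberSeen); `assert memberSeen` raises
-- outside Pre_; the in-place write at the end is a side effect, not part of the return value
def expandBasin_alt (basin : Int) (gridXMax : Int) (gridYMax : Int) (heights : List (List Int)) : Bool :=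
  let st := (PySem.List.pyRange 0 gridXMax 1).foldl (fun st x =>
    (PySem.List.pyRange 0 gridYMax 1).foldl (fun (st : Int × (Int × Int) × Bool × Bool) y =>
      if PySem.List.pyGetD (PySem.List.pyGetD heights y []) x 0 == basin then
        [(x, y - 1), (x, y + 1), (x - 1, y), (x + 1, y)].foldl
          (fun (st : Int × (Int × Int) × Bool × Bool) nb =>
            if 0 ≤ nb.1 ∧ nb.1 < gridXMax ∧ 0 ≤ nb.2 ∧ nb.2 < gridYMax then
              let v := PySem.List.pyGetD (PySem.List.pyGetD heights nb.2 []) nb.1 0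
              if v < 9 ∧ v < st.1 then (v, nb, true, st.2.2.2) else st
            else st) (st.1, st.2.1, st.2.2.1, true)
      else st) st) ((9 : Int), ((0 : Int), (0 : Int)), false, false)
  st.2.2.1

-- ===== PRECONDITION & SPEC =====
-- Pre_ excludes exactly the inputs where the Python A raises: an IndexError when the scanned
-- region exceeds the grid (gridYMax rows, each of length ≥ gridXMax), or the AssertionError
-- when no cell of the region equals basin.
def Pre_expandBasin (basin : Int) (gridXMax : Int) (gridYMax : Int) (heights : List (List Int)) : Prop :=
  gridYMax ≤ (heights.length : Int) ∧
  (∀ row ∈ heights.take gridYMax.toNat, gridXMax ≤ (row.length : Int)) ∧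
  ((heights.take gridYMax.toNat).any
    (fun row => (row.take gridXMax.toNat).any (fun c => c == basin))) = true
instance (basin : Int) (gridXMax : Int) (gridYMax : Int) (heights : List (List Int)) : Decidable (Pre_expandBasin basin gridXMax gridYMax heights) := by unfold Pre_expandBasin; infer_instance

def pvWitness_expandBasin : Int × Int × Int × List (List Int) := (5, 2, 2, [[5, 9], [9, 9]])

def Spec_expandBasin (basin : Int) (gridXMax : Int) (gridYMax : Int) (heights : List (List Int)) (out : Bool) : Prop := out = expandBasin_alt basin gridXMax gridYMax heights
instance (basin : Int) (gridXMax : Int) (gridYMax : Int) (heights : List (List Int)) (out : Bool) : Decidable (Spec_expandBasin basin gridXMax gridYMax heights out) := by unfold Spec_expandBasin; infer_instance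

-- ===== CLAIM (what is proved, stated in full; the proofs are below) =====
def Claim_equal_expandBasin : Prop := ∀ (basin : Int) (gridXMax : Int) (gridYMax : Int) (heights : List (List Int)), Dom_expandBasin basin gridXMax gridYMax heights → Pre_expandBasin basin gridXMax gridYMax heights → Spec_expandBasin basin gridXMax gridYMax heights (expandBasin basin gridXMax gridYMax heights)
-- ===== LEMMAS AND PROOFS =====

-- a neighbour (x,y) is a qualifying candidate: inside the grid and of height < 9
def nbOK (gridXMax gridYMax : Int) (heights : List (List Int)) (x y : Int) : Bool :=
  isValidPositionA x y gridXMax gridYMax && decide (getHeightA x y heights < 9)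

-- cell (x,y) has at least one qualifying neighbour (up, down, left, right)
def cellOK (gridXMax gridYMax : Int) (heights : List (List Int)) (x y : Int) : Bool :=
  nbOK gridXMax gridYMax heights x (y - 1) || nbOK gridXMax gridYMax heights x (y + 1) ||
  nbOK gridXMax gridYMax heights (x - 1) y || nbOK gridXMax gridYMax heights (x + 1) y

theorem lnp_any (x y gridXMax gridYMax : Int) (heights : List (List Int)) :
    (lowestNeighbourPositionA x y gridXMax gridYMax heights).any =
      cellOK gridXMax gridYMax heights x y := by
  simp only [lowestNeighbourPositionA, cellOK, nbOK]
  split_ifs <;> simp_all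

theorem foldA_found (positions : List (Int × Int)) (gridXMax gridYMax : Int)
    (heights : List (List Int)) (st : Int × (Int × Int) × Bool) :
    (positions.foldl (fun (st : Int × (Int × Int) × Bool) pos =>
      let a := lowestNeighbourPositionA pos.1 pos.2 gridXMax gridYMax heights
      if a.any = true then
        let st1 : Int × (Int × Int) × Bool := (st.1, st.2.1, true)
        if a.value < st1.1 then (st1.1, (a.x, a.y), true) else st1
      else st) st).2.2 =
    (st.2.2 || positions.any (fun pos =>
      (lowestNeighbourPositionA pos.1 pos.2 gridXMax gridYMax heights).any)) := by
  induction positions generalizing st with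
  | nil => simp
  | cons p ps ih =>
    simp only [List.foldl_cons, List.any_cons]
    rw [ih]
    split_ifs with h1 h2 <;> simp [h1]

-- membership list built by A's nested append-fold: `.any f` over it
theorem foldMembers_inner (ys : List Int) (basin x : Int) (heights : List (List Int))
    (acc : List (Int × Int)) (f : Int × Int → Bool) :
    ((ys.foldl (fun acc y =>
        if getHeightA x y heights == basin then acc ++ [(x, y)] else acc) acc).any f) =
    (acc.any f || ys.any (fun y => (getHeightA x y heights == basin) && f (x, y))) := by
  induction ys generalizing acc with
  | nil => simp
  | cons y ys ih =>
    simp only [List.foldl_cons, List.any_cons]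
    rw [ih]
    split_ifs with h <;> simp [h, Bool.or_assoc]

theorem foldMembers_any (xs : List Int) (ys : List Int) (basin : Int)
    (heights : List (List Int)) (acc : List (Int × Int)) (f : Int × Int → Bool) :
    ((xs.foldl (fun acc x => ys.foldl (fun acc y =>
        if getHeightA x y heights == basin then acc ++ [(x, y)] else acc) acc) acc).any f) =
    (acc.any f || xs.any (fun x => ys.any (fun y =>
        (getHeightA x y heights == basin) && f (x, y)))) := by
  induction xs generalizing acc with
  | nil => simp
  | cons x xs ih =>
    simp only [List.foldl_cons, List.any_cons]
    rw [ih, foldMembers_inner, Bool.or_assoc]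

-- B's step on one neighbour, under the invariant ¬found → lowestValue = 9
def stepN (gridXMax gridYMax : Int) (heights : List (List Int))
    (st : Int × (Int × Int) × Bool × Bool) (nb : Int × Int) : Int × (Int × Int) × Bool × Bool :=
  if 0 ≤ nb.1 ∧ nb.1 < gridXMax ∧ 0 ≤ nb.2 ∧ nb.2 < gridYMax then
    let v := PySem.List.pyGetD (PySem.List.pyGetD heights nb.2 []) nb.1 0
    if v < 9 ∧ v < st.1 then (v, nb, true, st.2.2.2) else st
  else st

theorem stepN_found (gridXMax gridYMax : Int) (heights : List (List Int))
    (st : Int × (Int × Int) × Bool × Bool) (nb : Int × Int) (hinv : st.2.2.1 = false → st.1 = 9) :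
    (stepN gridXMax gridYMax heights st nb).2.2.1 =
      (st.2.2.1 || nbOK gridXMax gridYMax heights nb.1 nb.2) ∧
    ((stepN gridXMax gridYMax heights st nb).2.2.1 = false →
      (stepN gridXMax gridYMax heights st nb).1 = 9) := by
  rcases hst : st.2.2.1 with _ | _
  · have h9 := hinv hst
    simp only [stepN, nbOK, isValidPositionA, getHeightA]
    split_ifs <;> simp_all <;> omega
  · simp only [stepN, nbOK, isValidPositionA, getHeightA]
    split_ifs <;> simp_all

theorem fold4_found (gridXMax gridYMax : Int) (heights : List (List Int))
    (st : Int × (Int × Int) × Bool × Bool) (x y : Int) (hinv : st.2.2.1 = false → st.1 = 9) :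
    (([(x, y - 1), (x, y + 1), (x - 1, y), (x + 1, y)].foldl
        (stepN gridXMax gridYMax heights) st).2.2.1 =
      (st.2.2.1 || cellOK gridXMax gridYMax heights x y)) ∧
    (([(x, y - 1), (x, y + 1), (x - 1, y), (x + 1, y)].foldl
        (stepN gridXMax gridYMax heights) st).2.2.1 = false →
      ([(x, y - 1), (x, y + 1), (x - 1, y), (x + 1, y)].foldl
        (stepN gridXMax gridYMax heights) st).1 = 9) := by
  obtain ⟨e1, i1⟩ := stepN_found gridXMax gridYMax heights st (x, y - 1) hinv
  obtain ⟨e2, i2⟩ := stepN_found gridXMax gridYMax heights _ (x, y + 1) i1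
  obtain ⟨e3, i3⟩ := stepN_found gridXMax gridYMax heights _ (x - 1, y) i2
  obtain ⟨e4, i4⟩ := stepN_found gridXMax gridYMax heights _ (x + 1, y) i3
  simp only [List.foldl_cons, List.foldl_nil] at *
  refine ⟨?_, i4⟩
  rw [e4, e3, e2, e1]
  simp [cellOK, Bool.or_assoc]

-- B's inner y-loop body on one cell
def stepY (basin gridXMax gridYMax : Int) (heights : List (List Int)) (x : Int)
    (st : Int × (Int × Int) × Bool × Bool) (y : Int) : Int × (Int × Int) × Bool × Bool :=
  if PySem.List.pyGetD (PySem.List.pyGetD heights y []) x 0 == basin then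
    [(x, y - 1), (x, y + 1), (x - 1, y), (x + 1, y)].foldl
      (stepN gridXMax gridYMax heights) (st.1, st.2.1, st.2.2.1, true)
  else st

theorem foldB_inner (ys : List Int) (basin gridXMax gridYMax x : Int)
    (heights : List (List Int)) (st : Int × (Int × Int) × Bool × Bool)
    (hinv : st.2.2.1 = false → st.1 = 9) :
    ((ys.foldl (stepY basin gridXMax gridYMax heights x) st).2.2.1 =
      (st.2.2.1 || ys.any (fun y =>
        (getHeightA x y heights == basin) && cellOK gridXMax gridYMax heights x y))) ∧
    ((ys.foldl (stepY basin gridXMax gridYMax heights x) st).2.2.1 = false →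
     (ys.foldl (stepY basin gridXMax gridYMax heights x) st).1 = 9) := by
  induction ys generalizing st with
  | nil => exact ⟨by simp, hinv⟩
  | cons y ys ih =>
    simp only [List.foldl_cons, List.any_cons]
    by_cases h : (PySem.List.pyGetD (PySem.List.pyGetD heights y []) x 0 == basin) = true
    · have hsy : stepY basin gridXMax gridYMax heights x st y =
          [(x, y - 1), (x, y + 1), (x - 1, y), (x + 1, y)].foldl
            (stepN gridXMax gridYMax heights) (st.1, st.2.1, st.2.2.1, true) := by
        simp [stepY, h]
      rw [hsy]
      have h4 := fold4_found gridXMax gridYMax heights (st.1, st.2.1, st.2.2.1, true) x y hinv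
      obtain ⟨ihe, ihi⟩ := ih _ h4.2
      refine ⟨?_, ihi⟩
      rw [ihe, h4.1]
      simp [getHeightA, h, Bool.or_assoc]
    · have hsy : stepY basin gridXMax gridYMax heights x st y = st := by
        simp [stepY, h]
      rw [hsy]
      obtain ⟨ihe, ihi⟩ := ih st hinv
      refine ⟨?_, ihi⟩
      rw [ihe]
      simp [getHeightA, h]

-- B's outer x-loop
theorem foldB_outer (xs : List Int) (ys : List Int) (basin gridXMax gridYMax : Int)
    (heights : List (List Int)) (st : Int × (Int × Int) × Bool × Bool)
    (hinv : st.2.2.1 = false → st.1 = 9) :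
    ((xs.foldl (fun st x => ys.foldl (stepY basin gridXMax gridYMax heights x) st) st).2.2.1 =
      (st.2.2.1 || xs.any (fun x => ys.any (fun y =>
        (getHeightA x y heights == basin) && cellOK gridXMax gridYMax heights x y)))) ∧
    ((xs.foldl (fun st x => ys.foldl (stepY basin gridXMax gridYMax heights x) st) st).2.2.1 = false →
     (xs.foldl (fun st x => ys.foldl (stepY basin gridXMax gridYMax heights x) st) st).1 = 9) := by
  induction xs generalizing st with
  | nil => exact ⟨by simp, hinv⟩
  | cons x xs ih =>
    simp only [List.foldl_cons, List.any_cons]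
    obtain ⟨ie, ii⟩ := foldB_inner ys basin gridXMax gridYMax x heights st hinv
    obtain ⟨ihe, ihi⟩ := ih _ ii
    refine ⟨?_, ihi⟩
    rw [ihe, ie, Bool.or_assoc]

theorem expandBasinAlt_eq_any (basin gridXMax gridYMax : Int) (heights : List (List Int)) :
    expandBasin_alt basin gridXMax gridYMax heights =
      (PySem.List.pyRange 0 gridXMax 1).any (fun x =>
        (PySem.List.pyRange 0 gridYMax 1).any (fun y =>
          (getHeightA x y heights == basin) && cellOK gridXMax gridYMax heights x y)) := by
  have hdef : expandBasin_alt basin gridXMax gridYMax heights =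
      ((PySem.List.pyRange 0 gridXMax 1).foldl
        (fun st x => (PySem.List.pyRange 0 gridYMax 1).foldl
          (stepY basin gridXMax gridYMax heights x) st)
        ((9 : Int), ((0 : Int), (0 : Int)), false, false)).2.2.1 := rfl
  rw [hdef,
    (foldB_outer (PySem.List.pyRange 0 gridXMax 1) (PySem.List.pyRange 0 gridYMax 1)
      basin gridXMax gridYMax heights ((9 : Int), ((0 : Int), (0 : Int)), false, false)
      (fun _ => rfl)).1]
  simp

theorem expandBasin_eq_any (basin gridXMax gridYMax : Int) (heights : List (List Int)) :
    expandBasin basin gridXMax gridYMax heights =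
      (PySem.List.pyRange 0 gridXMax 1).any (fun x =>
        (PySem.List.pyRange 0 gridYMax 1).any (fun y =>
          (getHeightA x y heights == basin) && cellOK gridXMax gridYMax heights x y)) := by
  simp only [expandBasin, findBasinMemberPositionsA]
  rw [foldA_found, foldMembers_any]
  simp only [List.any_nil, Bool.false_or]
  congr 1
  funext x
  congr 1
  funext y
  simp [lnp_any]

-- ===== VERDICT (by name: the statement is the Claim_ definition above) =====
theorem expandBasin_spec : Claim_equal_expandBasin := by
  intro basin gridXMax gridYMax heights _ _
  unfold Spec_expandBasin
  rw [expandBasin_eq_any, expandBasinAlt_eq_any]
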